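-- pv_equiv track=rewrite | github.com/cohbev/python-email-address-validator | EmailValidator_CohenBeveridge.py | DotsValid
-- ===== SOURCE A (Python) =====
-- def UnBackslashed(string, character):
--     backslashes = 0
--     if string[character - 1] != '\\':  # Returns True straight away if the character before isn't a backslash
--         return True
--     for x in range(character):
--         if string[character - x - 1] == '\\':   # Checks every character counting backwards
--             backslashes += 1
--         else:
--             break   # If it's not a backslash the loop ends
--     return backslashes % 2 == 0  # Backslash amount must be even to be plain/literal
--
-- def OpenQuoteAndBracket(address):
--     openquote = -1
--     openbracket = -1
--     for char in range(len(address)):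
--         if UnBackslashed(address, char):  # A backslashed quote/bracket does not count
--             if address[char] == '"' and openquote == -1:
--                 openquote = char
--             if address[char] == '(' and openbracket == -1:
--                 openbracket = char
--     return openquote, openbracket
--
-- def CloseBracket(address, openbracket):
--     check = address[openbracket + 1:]       # The string to check
--     incomments = 1
--     closebracket = -1
--     for char in range(len(check)):
--         if incomments == 0:     # If the comment has closed, break the loop
--             break
--         if UnBackslashed(check, char):
--             if check[char] == '(':      # The imbalance of comments within comments increases
--                 incomments += 1
--             elif check[char] == ')':    # The imbalance of comments within comments decreases
--                 incomments -= 1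
--                 closebracket = char
--     if closebracket == -1 or incomments != 0:   # Check if parentheses did not match
--         return 'invalid'
--     else:
--         return closebracket + openbracket + 1   # Accounts for the variable 'check' being shorter than the address
--
-- def ReplacePart(address, start, end, sort):     # 'sort' is either "q" or "c"
--     before = address[:start]
--     after = address[end + 1:]
--     part = address[start:end + 1]
--     length = len(part)
--     fillin = sort * length      # E.g. (aa) -> cccc  ||  "aa" -> qqqq
--     address = before + fillin + after
--     return address
--
-- def CloseQuote(address, openquote):
--     check = address[openquote + 1:]     # A variable with part the of address to check
--     closequote = -1
--     for char in range(len(check)):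
--         if UnBackslashed(check, char):
--             if check[char] == '"':
--                 closequote = char
--                 break
--     if closequote == -1:
--         return 'invalid'
--     else:
--         return closequote + openquote + 1
--
-- def ReplaceQuotesComments(address):
--     while True:
--         openquote, openbracket = OpenQuoteAndBracket(address)  # Assign the opening quote and the opening bracket
--
--         if openquote == -1 and openbracket != -1:  # Comments were found, but not quotes
--             closebracket = CloseBracket(address, openbracket)
--             address = ReplacePart(address, openbracket, closebracket, 'c')  # Replaces the comment and moves on
--
--         elif openquote == -1 and openbracket == -1:  # Neither quote not comment exists
--             return address  # Ends the function
--
--         elif openbracket == -1 and openquote != -1:  # Quotes were found, but not comments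
--             closequote = CloseQuote(address, openquote)
--             address = ReplacePart(address, openquote, closequote, 'q')  # Replaces the quote and move on
--
--         else:  # Both quotes and comments were found
--             if openquote < openbracket:  # The quote is first
--                 closequote = CloseQuote(address, openquote)
--                 address = ReplacePart(address, openquote, closequote, 'q')  # Replaces the quote
--             else:   # The comment is first
--                 closebracket = CloseBracket(address, openbracket)
--                 address = ReplacePart(address, openbracket, closebracket, 'c')  # Replaces the comment
--
-- def DotsValid(address):
--     address = ReplaceQuotesComments(address)    # Quoted or commented dots don't count
--     for char in range(len(address)):
--         if address[char] == '.':
--             if char == 0: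
--                 return 'Address began with a dot'
--             elif char == len(address) - 1:
--                 return 'Address ended with a dot'
--             elif address[char + 1] == '.':
--                 return 'Address contained successive dots'
--             elif address[char + 1] == '@':
--                 return 'Local part ended with a dot'
--             elif address[char - 1] == '@':
--                 return 'Domain began with a dot'
--     return 'valid'
-- ===== SOURCE B (Python) =====
-- def DotsValid(address):
--     # One-pass masking: a single left-to-right scan with an escape flag, an
--     # in-quote flag and a comment-nesting counter replaces A's repeated
--     # whole-string rescans.  Raises ValueError (instead of A's TypeError) on an
--     # unterminated quote or comment; that is outside the stated precondition.
--     masked = []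
--     depth = 0
--     inquote = False
--     esc = False
--     for ch in address:
--         if depth > 0:
--             masked.append('c')
--             if esc:
--                 esc = False
--             elif ch == '\\':
--                 esc = True
--             elif ch == '(':
--                 depth += 1
--             elif ch == ')':
--                 depth -= 1
--         elif inquote:
--             masked.append('q')
--             if esc:
--                 esc = False
--             elif ch == '\\':
--                 esc = True
--             elif ch == '"':
--                 inquote = False
--         elif esc:
--             esc = False
--             masked.append(ch)
--         elif ch == '\\':
--             esc = True
--             masked.append(ch)
--         elif ch == '"':
--             inquote = True
--             masked.append('q')
--         elif ch == '(':
--             depth = 1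
--             masked.append('c')
--         else:
--             masked.append(ch)
--     if inquote or depth > 0:
--         raise ValueError('unmatched quote or comment')
--     address = ''.join(masked)
--     for char in range(len(address)):
--         if address[char] == '.':
--             if char == 0:
--                 return 'Address began with a dot'
--             elif char == len(address) - 1:
--                 return 'Address ended with a dot'
--             elif address[char + 1] == '.':
--                 return 'Address contained successive dots'
--             elif address[char + 1] == '@':
--                 return 'Local part ended with a dot'
--             elif address[char - 1] == '@':
--                 return 'Domain began with a dot'
--     return 'valid'
-- ===== Notes on version B (the rewrite author's own statement) =====
-- stated objective: faster
-- what changed: Replaces A's repeated whole-string rescans (find first unescaped opener, scan for its close with per-character backward backslash counting, rebuild the string, restart) by a single left-to-right pass holding an escape flag, an in-quote flag and a comment-nesting counter, then one dot scan; Pre_ excludes only the unterminated-quote/comment inputs on which A raises TypeError (B raises ValueError there).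
import Mathlib
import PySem

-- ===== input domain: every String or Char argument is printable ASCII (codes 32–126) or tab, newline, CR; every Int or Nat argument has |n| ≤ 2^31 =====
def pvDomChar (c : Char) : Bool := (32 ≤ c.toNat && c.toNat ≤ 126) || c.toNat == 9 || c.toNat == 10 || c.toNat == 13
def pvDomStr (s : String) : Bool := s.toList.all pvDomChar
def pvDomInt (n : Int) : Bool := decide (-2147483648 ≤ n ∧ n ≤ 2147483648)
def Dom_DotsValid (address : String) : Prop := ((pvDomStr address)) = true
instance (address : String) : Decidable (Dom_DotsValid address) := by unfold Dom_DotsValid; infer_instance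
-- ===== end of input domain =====

-- B replaces A's O(n^3) repeated whole-string rescans by one linear scan with an
-- escape flag, an in-quote flag and a comment-nesting counter (same return value;
-- on unterminated quotes/comments both Pythons raise, which Pre_ excludes).

-- ===== PORT A =====
-- UnBackslashed: the backward backslash-counting loop (s[character-1] may be the
-- Python wraparound index -1; pyGet? reproduces it).
def ubLoop (s : List Char) (i x acc : Nat) : Nat :=
  if x < i then
    if PySem.List.pyGetD s ((i : Int) - x - 1) ' ' = '\\' then ubLoop s i (x + 1) (acc + 1)
    else acc
  else acc
termination_by i - x

def unBackslashed (s : List Char) (i : Nat) : Bool :=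
  if PySem.List.pyGet? s ((i : Int) - 1) ≠ some '\\' then true
  else decide (ubLoop s i 0 0 % 2 = 0)

-- OpenQuoteAndBracket
def oqabLoop (s : List Char) (i : Nat) (oq ob : Int) : Int × Int :=
  if _h : i < s.length then
    if unBackslashed s i then
      let oq' := if PySem.List.pyGetD s (i : Int) ' ' = '"' ∧ oq = -1 then (i : Int) else oq
      let ob' := if PySem.List.pyGetD s (i : Int) ' ' = '(' ∧ ob = -1 then (i : Int) else ob
      oqabLoop s (i + 1) oq' ob'
    else oqabLoop s (i + 1) oq ob
  else (oq, ob)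
termination_by s.length - i

def openQuoteAndBracket (s : List Char) : Int × Int := oqabLoop s 0 (-1) (-1)

-- CloseQuote ('invalid' is rendered as none; Python's later use of it raises)
def cqLoop (check : List Char) (i : Nat) (cq : Int) : Int :=
  if _h : i < check.length then
    if unBackslashed check i then
      if PySem.List.pyGetD check (i : Int) ' ' = '"' then (i : Int)   -- closequote = char; break
      else cqLoop check (i + 1) cq
    else cqLoop check (i + 1) cq
  else cq
termination_by check.length - i

def closeQuote (s : List Char) (oq : Int) : Option Int :=
  let check := PySem.List.slice s (some (oq + 1)) none
  let cq := cqLoop check 0 (-1)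
  if cq = -1 then none else some (cq + oq + 1)

-- CloseBracket (returns the pair (closebracket, incomments) the loop ends with)
def cbLoop (check : List Char) (i : Nat) (inc cb : Int) : Int × Int :=
  if _h : i < check.length then
    if inc = 0 then (cb, inc)      -- break
    else if unBackslashed check i then
      if PySem.List.pyGetD check (i : Int) ' ' = '(' then cbLoop check (i + 1) (inc + 1) cb
      else if PySem.List.pyGetD check (i : Int) ' ' = ')' then cbLoop check (i + 1) (inc - 1) (i : Int)
      else cbLoop check (i + 1) inc cb
    else cbLoop check (i + 1) inc cb
  else (cb, inc)
termination_by check.length - i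

def closeBracket (s : List Char) (ob : Int) : Option Int :=
  let check := PySem.List.slice s (some (ob + 1)) none
  let r := cbLoop check 0 1 (-1)
  if r.1 = -1 ∨ r.2 ≠ 0 then none else some (r.1 + ob + 1)

-- ReplacePart
def replacePart (s : List Char) (start stop : Int) (sort : Char) : List Char :=
  let before := PySem.List.slice s none (some start)
  let after := PySem.List.slice s (some (stop + 1)) none
  let part := PySem.List.slice s (some start) (some (stop + 1))
  before ++ List.replicate part.length sort ++ after

-- ReplaceQuotesComments: the 'while True' loop; each pass removes at least one
-- '"' or '(' from the string, so length+1 units of fuel are never exhausted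
-- (none also renders Python's TypeError on an unterminated quote/comment).
def rqcLoop : Nat → List Char → Option (List Char)
  | 0, _ => none
  | f + 1, s =>
    let p := openQuoteAndBracket s
    if p.1 = -1 ∧ p.2 ≠ -1 then
      match closeBracket s p.2 with
      | none => none
      | some cb => rqcLoop f (replacePart s p.2 cb 'c')
    else if p.1 = -1 ∧ p.2 = -1 then some s
    else if p.2 = -1 ∧ p.1 ≠ -1 then
      match closeQuote s p.1 with
      | none => none
      | some cq => rqcLoop f (replacePart s p.1 cq 'q')
    else
      if p.1 < p.2 then
        match closeQuote s p.1 with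
        | none => none
        | some cq => rqcLoop f (replacePart s p.1 cq 'q')
      else
        match closeBracket s p.2 with
        | none => none
        | some cb => rqcLoop f (replacePart s p.2 cb 'c')

-- the final dot-checking loop of DotsValid (textually identical in A and B,
-- so both ports share this transliteration)
def dotScan (s : List Char) (i : Nat) : String :=
  if _h : i < s.length then
    if PySem.List.pyGetD s (i : Int) ' ' = '.' then
      if i = 0 then "Address began with a dot"
      else if i = s.length - 1 then "Address ended with a dot"
      else if PySem.List.pyGetD s ((i : Int) + 1) ' ' = '.' then "Address contained successive dots"
      else if PySem.List.pyGetD s ((i : Int) + 1) ' ' = '@' then "Local part ended with a dot"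
      else if PySem.List.pyGetD s ((i : Int) - 1) ' ' = '@' then "Domain began with a dot"
      else dotScan s (i + 1)
    else dotScan s (i + 1)
  else "valid"
termination_by s.length - i

def DotsValid (address : String) : String :=
  let l := address.toList
  match rqcLoop (l.length + 1) l with
  | some m => dotScan m 0
  | none => ""   -- Python raises TypeError here; excluded by Pre_DotsValid

-- ===== PORT B =====
-- one pass; state (depth, inquote, esc); output char emitted in front
def maskRun : List Char → Int → Bool → Bool → List Char × (Int × Bool × Bool)
  | [], depth, inq, esc => ([], (depth, inq, esc))
  | ch :: rest, depth, inq, esc =>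
    if depth > 0 then
      let st : Int × Bool × Bool :=
        if esc then (depth, inq, false)
        else if ch = '\\' then (depth, inq, true)
        else if ch = '(' then (depth + 1, inq, false)
        else if ch = ')' then (depth - 1, inq, false)
        else (depth, inq, false)
      let r := maskRun rest st.1 st.2.1 st.2.2
      ('c' :: r.1, r.2)
    else if inq then
      let st : Int × Bool × Bool :=
        if esc then (depth, inq, false)
        else if ch = '\\' then (depth, inq, true)
        else if ch = '"' then (depth, false, false)
        else (depth, inq, false)
      let r := maskRun rest st.1 st.2.1 st.2.2
      ('q' :: r.1, r.2)
    else if esc then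
      let r := maskRun rest depth inq false
      (ch :: r.1, r.2)
    else if ch = '\\' then
      let r := maskRun rest depth inq true
      (ch :: r.1, r.2)
    else if ch = '"' then
      let r := maskRun rest depth true false
      ('q' :: r.1, r.2)
    else if ch = '(' then
      let r := maskRun rest 1 inq false
      ('c' :: r.1, r.2)
    else
      let r := maskRun rest depth inq false
      (ch :: r.1, r.2)

def DotsValid_alt (address : String) : String :=
  let r := maskRun address.toList 0 false false
  if r.2.2.1 || decide (r.2.1 > 0) then ""   -- Python raises ValueError here; excluded by Pre_DotsValid
  else dotScan r.1 0

-- ===== PRECONDITION & SPEC =====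
-- the quote/comment automaton step (transition only, no output); Pre_ says the
-- scan ends outside any quote or comment — exactly the inputs on which the
-- Python A returns normally (on the others it raises TypeError)
def wfStep (st : Int × Bool × Bool) (ch : Char) : Int × Bool × Bool :=
  if st.1 > 0 then
    if st.2.2 then (st.1, st.2.1, false)
    else if ch = '\\' then (st.1, st.2.1, true)
    else if ch = '(' then (st.1 + 1, st.2.1, false)
    else if ch = ')' then (st.1 - 1, st.2.1, false)
    else (st.1, st.2.1, false)
  else if st.2.1 then
    if st.2.2 then (st.1, st.2.1, false)
    else if ch = '\\' then (st.1, st.2.1, true)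
    else if ch = '"' then (st.1, false, false)
    else (st.1, st.2.1, false)
  else if st.2.2 then (st.1, st.2.1, false)
  else if ch = '\\' then (st.1, st.2.1, true)
  else if ch = '"' then (st.1, true, false)
  else if ch = '(' then (1, st.2.1, false)
  else (st.1, st.2.1, false)

def Pre_DotsValid (address : String) : Prop :=
  (address.toList.foldl wfStep (0, false, false)).1 = 0 ∧
  (address.toList.foldl wfStep (0, false, false)).2.1 = false

instance (address : String) : Decidable (Pre_DotsValid address) := by
  unfold Pre_DotsValid; infer_instance

def pvWitness_DotsValid : String := "a(b)@\"c\".d"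

def Spec_DotsValid (address : String) (out : String) : Prop := out = DotsValid_alt address
instance (address : String) (out : String) : Decidable (Spec_DotsValid address out) := by unfold Spec_DotsValid; infer_instance

-- ===== CLAIM (what is proved, stated in full; the proofs are below) =====
def Claim_equal_DotsValid : Prop := ∀ (address : String), Dom_DotsValid address → Pre_DotsValid address → Spec_DotsValid address (DotsValid address)


-- ===== LEMMAS AND PROOFS =====

-- ---- spec-level notions ----

-- length of the backslash run immediately before index i
def runD (l : List Char) : Nat → Nat
  | 0 => 0
  | i + 1 => if l.getD i ' ' = '\\' then runD l i + 1 else 0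

def optInt : Option Nat → Int
  | none => -1
  | some j => (j : Int)

-- first index ≥ i holding an unescaped occurrence of c
def ffrom (l : List Char) (c : Char) (i : Nat) : Option Nat :=
  if _h : i < l.length then
    if runD l i % 2 = 0 ∧ l.getD i ' ' = c then some i else ffrom l c (i + 1)
  else none
termination_by l.length - i

-- first index ≥ i where the running comment depth (starting at d) hits 0
def mdepth (l : List Char) (i : Nat) (d : Int) : Option Nat :=
  if _h : i < l.length then
    if runD l i % 2 = 0 ∧ l.getD i ' ' = '(' then mdepth l (i + 1) (d + 1)
    else if runD l i % 2 = 0 ∧ l.getD i ' ' = ')' then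
      if d = 1 then some i else mdepth l (i + 1) (d - 1)
    else mdepth l (i + 1) d
  else none
termination_by l.length - i

def countQB (l : List Char) : Nat := (l.filter (fun c => c = '"' ∨ c = '(')).length

-- parity of the backslash run before i, as the automaton's esc flag
def eOf (l : List Char) (i : Nat) : Bool := runD l i % 2 = 1

-- ---- A-side characterisations ----

theorem ubLoop_eq (l : List Char) (i : Nat) (hi : i ≤ l.length) :
    ∀ x acc, ubLoop l i x acc = acc + runD l (i - x) := by
  intro x acc
  induction hn : i - x generalizing x acc with
  | zero =>
    rw [ubLoop]
    have hx : ¬ x < i := by omega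
    simp only [hx, reduceIte]
    simp [runD]
  | succ n ih =>
    have hx : x < i := by omega
    rw [ubLoop]
    have hidx : ((i : Int) - x - 1) = ((i - x - 1 : Nat) : Int) := by omega
    rw [hidx, PySem.List.pyGetD_natCast]
    have hnn : n = i - x - 1 := by omega
    subst hnn
    by_cases hc : l.getD (i - x - 1) ' ' = '\\'
    · simp only [hx, hc, reduceIte]
      rw [ih (x + 1) (acc + 1) (by omega), runD]
      simp only [hc, reduceIte]
      omega
    · simp only [hx, hc, reduceIte]
      rw [runD]
      simp [hc, -List.getD_eq_getElem?_getD]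

theorem unBackslashed_eq (l : List Char) (i : Nat) (hi : i ≤ l.length) :
    unBackslashed l i = decide (runD l i % 2 = 0) := by
  cases i with
  | zero =>
    rw [unBackslashed]
    split
    · simp [runD]
    · simp [ubLoop, runD]
  | succ n =>
    have hn : n < l.length := by omega
    have hidx : (((n + 1 : Nat) : Int)) - 1 = ((n : Nat) : Int) := by omega
    rw [unBackslashed, hidx, PySem.List.pyGet?_natCast, List.getElem?_eq_getElem hn]
    by_cases hc : l[n] = '\\'
    · simp only [hc, ne_eq, not_true_eq_false, reduceIte, not_not]
      rw [ubLoop_eq l (n + 1) hi 0 0]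
      simp
    · simp only [ne_eq, Option.some.injEq, hc, not_false_eq_true, reduceIte, true_eq_decide_iff]
      rw [runD]
      have hg : l.getD n ' ' ≠ '\\' := by rw [List.getD_eq_getElem _ _ hn]; exact hc
      simp [hg, -List.getD_eq_getElem?_getD]

theorem ffrom_step (l : List Char) (c : Char) (i : Nat) (h : i < l.length) :
    ffrom l c i = if runD l i % 2 = 0 ∧ l.getD i ' ' = c then some i else ffrom l c (i + 1) := by
  rw [ffrom]; simp [h]

theorem ffrom_stop (l : List Char) (c : Char) (i : Nat) (h : ¬ i < l.length) :
    ffrom l c i = none := by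
  rw [ffrom]; simp [h]

theorem mdepth_step (l : List Char) (i : Nat) (d : Int) (h : i < l.length) :
    mdepth l i d =
      if runD l i % 2 = 0 ∧ l.getD i ' ' = '(' then mdepth l (i + 1) (d + 1)
      else if runD l i % 2 = 0 ∧ l.getD i ' ' = ')' then
        if d = 1 then some i else mdepth l (i + 1) (d - 1)
      else mdepth l (i + 1) d := by
  rw [mdepth]; simp [h]

theorem mdepth_stop (l : List Char) (i : Nat) (d : Int) (h : ¬ i < l.length) :
    mdepth l i d = none := by
  rw [mdepth]; simp [h]

theorem ffrom_some_facts (l : List Char) (c : Char) (i j : Nat)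
    (h : ffrom l c i = some j) :
    i ≤ j ∧ j < l.length ∧ runD l j % 2 = 0 ∧ l.getD j ' ' = c := by
  induction hn : l.length - i generalizing i with
  | zero => rw [ffrom_stop l c i (by omega)] at h; exact absurd h (by simp)
  | succ n ih =>
    have hlt : i < l.length := by omega
    rw [ffrom_step l c i hlt] at h
    by_cases hcond : runD l i % 2 = 0 ∧ l.getD i ' ' = c
    · rw [if_pos hcond] at h
      injection h with h
      subst h
      exact ⟨le_refl _, hlt, hcond⟩
    · rw [if_neg hcond] at h
      obtain ⟨h1, h2, h3⟩ := ih (i + 1) h (by omega)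
      exact ⟨by omega, h2, h3⟩

theorem ffrom_some_min (l : List Char) (c : Char) (i j : Nat)
    (h : ffrom l c i = some j) :
    ∀ k, i ≤ k → k < j → ¬(runD l k % 2 = 0 ∧ l.getD k ' ' = c) := by
  induction hn : l.length - i generalizing i with
  | zero => rw [ffrom_stop l c i (by omega)] at h; exact absurd h (by simp)
  | succ n ih =>
    have hlt : i < l.length := by omega
    rw [ffrom_step l c i hlt] at h
    by_cases hcond : runD l i % 2 = 0 ∧ l.getD i ' ' = c
    · rw [if_pos hcond] at h
      injection h with h
      subst h
      intro k hk1 hk2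
      omega
    · rw [if_neg hcond] at h
      intro k hk1 hk2
      rcases Nat.eq_or_lt_of_le hk1 with rfl | hk
      · exact hcond
      · exact ih (i + 1) h (by omega) k (by omega) hk2

theorem ffrom_none_forall (l : List Char) (c : Char) (i : Nat)
    (h : ffrom l c i = none) :
    ∀ j, i ≤ j → j < l.length → ¬(runD l j % 2 = 0 ∧ l.getD j ' ' = c) := by
  induction hn : l.length - i generalizing i with
  | zero => intro j h1 h2; omega
  | succ n ih =>
    have hlt : i < l.length := by omega
    rw [ffrom_step l c i hlt] at h
    by_cases hcond : runD l i % 2 = 0 ∧ l.getD i ' ' = c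
    · rw [if_pos hcond] at h; cases h
    · rw [if_neg hcond] at h
      intro j hj1 hj2
      rcases Nat.eq_or_lt_of_le hj1 with rfl | hj
      · exact hcond
      · exact ih (i + 1) h (by omega) j (by omega) hj2

theorem oqabLoop_eq (l : List Char) : ∀ i oq ob,
    oqabLoop l i oq ob =
      ((if oq = -1 then optInt (ffrom l '"' i) else oq),
       (if ob = -1 then optInt (ffrom l '(' i) else ob)) := by
  intro i
  induction hn : l.length - i generalizing i with
  | zero =>
    intro oq ob
    rw [oqabLoop, dif_neg (by omega : ¬ i < l.length)]
    rw [ffrom_stop l '"' i (by omega), ffrom_stop l '(' i (by omega)]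
    simp only [optInt]
    split_ifs <;> simp_all
  | succ n ih =>
    intro oq ob
    have hlt : i < l.length := by omega
    rw [oqabLoop, dif_pos hlt]
    rw [unBackslashed_eq l i (le_of_lt hlt)]
    rw [ffrom_step l '"' i hlt, ffrom_step l '(' i hlt]
    have hne : ¬ ((i : Nat) : Int) = -1 := by omega
    by_cases he : runD l i % 2 = 0
    · rw [if_pos (by simp [he])]
      simp only [PySem.List.pyGetD_natCast]
      rw [ih (i + 1) (by omega)]
      by_cases hq : l.getD i ' ' = '"' <;> by_cases hb : l.getD i ' ' = '(' <;>
        by_cases hoq : oq = -1 <;> by_cases hob : ob = -1 <;>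
          simp only [hq, hb, hoq, hob, he, hne, true_and, and_true, false_and, and_false,
            and_self, if_true, if_false, reduceIte, optInt] <;>
          simp_all [optInt]
    · rw [if_neg (by simp [he])]
      rw [ih (i + 1) (by omega)]
      have hc1 : ¬ (runD l i % 2 = 0 ∧ l.getD i ' ' = '"') := fun hh => he hh.1
      have hc2 : ¬ (runD l i % 2 = 0 ∧ l.getD i ' ' = '(') := fun hh => he hh.1
      rw [if_neg hc1, if_neg hc2]

theorem openQuoteAndBracket_eq (l : List Char) :
    openQuoteAndBracket l = (optInt (ffrom l '"' 0), optInt (ffrom l '(' 0)) := by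
  rw [openQuoteAndBracket, oqabLoop_eq l 0]
  simp

theorem cqLoop_eq (l : List Char) : ∀ i cq,
    cqLoop l i cq = (match ffrom l '"' i with | some j => (j : Int) | none => cq) := by
  intro i
  induction hn : l.length - i generalizing i with
  | zero =>
    intro cq
    rw [cqLoop, dif_neg (by omega : ¬ i < l.length), ffrom_stop l '"' i (by omega)]
  | succ n ih =>
    intro cq
    have hlt : i < l.length := by omega
    rw [cqLoop, dif_pos hlt]
    rw [unBackslashed_eq l i (le_of_lt hlt), ffrom_step l '"' i hlt]
    by_cases he : runD l i % 2 = 0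
    · rw [if_pos (by simp [he])]
      simp only [PySem.List.pyGetD_natCast]
      by_cases hq : l.getD i ' ' = '"'
      · rw [if_pos hq, if_pos ⟨he, hq⟩]
      · rw [if_neg hq, if_neg (fun hh => hq hh.2), ih (i + 1) (by omega)]
    · rw [if_neg (by simp [he]), if_neg (fun hh => he hh.1), ih (i + 1) (by omega)]

theorem closeQuote_eq (l : List Char) (p : Nat) :
    closeQuote l (p : Int) =
      (match ffrom (l.drop (p + 1)) '"' 0 with
       | some q => some ((q : Int) + p + 1)
       | none => none) := by
  have hsl : PySem.List.slice l (some ((p : Int) + 1)) none = l.drop (p + 1) := by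
    rw [show ((p : Int) + 1) = ((p + 1 : Nat) : Int) by omega, PySem.List.slice_from_natCast]
  simp only [closeQuote, hsl, cqLoop_eq]
  cases hf : ffrom (l.drop (p + 1)) '"' 0 with
  | none => simp
  | some j =>
    simp only []
    rw [if_neg (by omega : ¬ ((j : Nat) : Int) = -1)]

theorem cbLoop_zero (l : List Char) (k : Nat) (cb : Int) :
    cbLoop l k 0 cb = (cb, 0) := by
  rw [cbLoop]
  split <;> simp

theorem cbLoop_some (l : List Char) : ∀ i (d : Int) (j : Nat) cb, 1 ≤ d →
    mdepth l i d = some j → cbLoop l i d cb = ((j : Int), 0) := by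
  intro i
  induction hn : l.length - i generalizing i with
  | zero => intro d j cb hd h; rw [mdepth_stop l i d (by omega)] at h; exact absurd h (by simp)
  | succ n ih =>
    intro d j cb hd h
    have hlt : i < l.length := by omega
    rw [mdepth_step l i d hlt] at h
    rw [cbLoop, dif_pos hlt]
    simp only [PySem.List.pyGetD_natCast]
    rw [unBackslashed_eq l i (le_of_lt hlt)]
    have hdz : ¬ d = 0 := by omega
    simp only [hdz, reduceIte]
    by_cases he : runD l i % 2 = 0
    · simp only [he, decide_true, reduceIte, true_and] at h ⊢
      by_cases hb : l.getD i ' ' = '('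
      · simp only [hb, reduceIte] at h ⊢
        exact ih (i + 1) (by omega) _ _ _ (by omega) h
      · simp only [hb, reduceIte] at h ⊢
        by_cases hc : l.getD i ' ' = ')'
        · simp only [hc, reduceIte] at h ⊢
          by_cases hone : d = 1
          · simp only [hone, reduceIte, Option.some.injEq] at h ⊢
            subst h
            simpa using cbLoop_zero l (i + 1) (i : Int)
          · simp only [hone, reduceIte] at h ⊢
            have := ih (i + 1) (by omega) (d - 1) j (i : Int) (by omega) h
            simpa [hone] using this
        · simp only [hc, reduceIte] at h ⊢
          exact ih (i + 1) (by omega) _ _ _ hd h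
    · simp only [he, decide_false, Bool.false_eq_true, reduceIte, false_and] at h ⊢
      exact ih (i + 1) (by omega) _ _ _ hd h

theorem cbLoop_none (l : List Char) : ∀ i (d : Int) cb, 1 ≤ d →
    mdepth l i d = none → 1 ≤ (cbLoop l i d cb).2 := by
  intro i
  induction hn : l.length - i generalizing i with
  | zero =>
    intro d cb hd h
    rw [cbLoop, dif_neg (by omega : ¬ i < l.length)]
    exact hd
  | succ n ih =>
    intro d cb hd h
    have hlt : i < l.length := by omega
    rw [mdepth_step l i d hlt] at h
    rw [cbLoop, dif_pos hlt]
    simp only [PySem.List.pyGetD_natCast]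
    rw [unBackslashed_eq l i (le_of_lt hlt)]
    have hdz : ¬ d = 0 := by omega
    simp only [hdz, reduceIte]
    by_cases he : runD l i % 2 = 0
    · simp only [he, decide_true, reduceIte, true_and] at h ⊢
      by_cases hb : l.getD i ' ' = '('
      · simp only [hb, reduceIte] at h ⊢
        exact ih (i + 1) (by omega) _ _ (by omega) h
      · simp only [hb, reduceIte] at h ⊢
        by_cases hc : l.getD i ' ' = ')'
        · simp only [hc, reduceIte] at h ⊢
          by_cases hone : d = 1
          · simp [hone] at h
          · simp only [hone, reduceIte] at h ⊢
            exact ih (i + 1) (by omega) (d - 1) _ (by omega) h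
        · simp only [hc, reduceIte] at h ⊢
          exact ih (i + 1) (by omega) _ _ hd h
    · simp only [he, decide_false, Bool.false_eq_true, reduceIte, false_and] at h ⊢
      exact ih (i + 1) (by omega) _ _ hd h

theorem closeBracket_eq (l : List Char) (p : Nat) :
    closeBracket l (p : Int) =
      (match mdepth (l.drop (p + 1)) 0 1 with
       | some j => some ((j : Int) + p + 1)
       | none => none) := by
  have hsl : PySem.List.slice l (some ((p : Int) + 1)) none = l.drop (p + 1) := by
    rw [show ((p : Int) + 1) = ((p + 1 : Nat) : Int) by omega, PySem.List.slice_from_natCast]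
  cases hf : mdepth (l.drop (p + 1)) 0 1 with
  | none =>
    have h2 := cbLoop_none (l.drop (p + 1)) 0 1 (-1) (by omega) hf
    simp only [closeBracket, hsl]
    rw [if_pos (Or.inr (by omega))]
  | some j =>
    have h2 := cbLoop_some (l.drop (p + 1)) 0 1 j (-1) (by omega) hf
    simp only [closeBracket, hsl, h2]
    rw [if_neg (by omega : ¬ (((j : Nat) : Int) = -1 ∨ (0 : Int) ≠ 0))]

theorem mdepth_some_facts (l : List Char) : ∀ i (d : Int) j,
    mdepth l i d = some j → i ≤ j ∧ j < l.length := by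
  intro i
  induction hn : l.length - i generalizing i with
  | zero => intro d j h; rw [mdepth_stop l i d (by omega)] at h; exact absurd h (by simp)
  | succ n ih =>
    intro d j h
    have hlt : i < l.length := by omega
    rw [mdepth_step l i d hlt] at h
    split_ifs at h with h1 h2 h3
    · obtain ⟨ha, hb⟩ := ih (i + 1) (by omega) _ _ h
      exact ⟨by omega, hb⟩
    · simp only [Option.some.injEq] at h; subst h; exact ⟨le_refl _, hlt⟩
    · obtain ⟨ha, hb⟩ := ih (i + 1) (by omega) _ _ h
      exact ⟨by omega, hb⟩
    · obtain ⟨ha, hb⟩ := ih (i + 1) (by omega) _ _ h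
      exact ⟨by omega, hb⟩

theorem replacePart_eq (l : List Char) (p e : Nat) (c : Char)
    (hpe : p ≤ e) (hel : e < l.length) :
    replacePart l (p : Int) (e : Int) c =
      l.take p ++ List.replicate (e + 1 - p) c ++ l.drop (e + 1) := by
  have h1 : PySem.List.slice l none (some (p : Int)) = l.take p :=
    PySem.List.slice_to_natCast ..
  have h3 : PySem.List.slice l (some ((e : Int) + 1)) none = l.drop (e + 1) := by
    rw [show ((e : Int) + 1) = ((e + 1 : Nat) : Int) by omega, PySem.List.slice_from_natCast]
  have h4 : PySem.List.slice l (some (p : Int)) (some ((e : Int) + 1)) = (l.drop p).take (e + 1 - p) := by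
    rw [show ((e : Int) + 1) = ((e + 1 : Nat) : Int) by omega, PySem.List.slice_natCast]
  simp only [replacePart, h1, h3, h4]
  have h5 : ((l.drop p).take (e + 1 - p)).length = e + 1 - p := by
    simp only [List.length_take, List.length_drop]
    omega
  rw [h5]

-- ---- generic facts ----

theorem drop_cons_getD (l : List Char) (i : Nat) (h : i < l.length) :
    l.drop i = l.getD i ' ' :: l.drop (i + 1) := by
  rw [List.drop_eq_getElem_cons h, List.getD_eq_getElem _ _ h]

theorem runD_congr (l l' : List Char) : ∀ i,
    (∀ k, k < i → l.getD k ' ' = l'.getD k ' ') → runD l i = runD l' i := by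
  intro i
  induction i with
  | zero => intro _; rfl
  | succ n ih =>
    intro h
    rw [runD, runD, h n (by omega), ih (fun k hk => h k (by omega))]

theorem eOf_succ (l : List Char) (i : Nat) :
    eOf l (i + 1) = (!eOf l i && (l.getD i ' ' == '\\')) := by
  by_cases hc : l.getD i ' ' = '\\' <;>
    rcases Nat.mod_two_eq_zero_or_one (runD l i) with hp | hp <;>
      simp only [eOf, runD, hc, reduceIte] <;>
        simp [hc, hp, -List.getD_eq_getElem?_getD, Nat.succ_mod_two_eq_one_iff,
          Nat.succ_mod_two_eq_zero_iff]

theorem countQB_append (a b : List Char) : countQB (a ++ b) = countQB a + countQB b := by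
  simp [countQB, List.filter_append]

theorem countQB_replicate (n : Nat) (c : Char) (h : ¬(c = '"' ∨ c = '(')) :
    countQB (List.replicate n c) = 0 := by
  simp [countQB, List.filter_replicate, h]

theorem countQB_le_length (l : List Char) : countQB l ≤ l.length := by
  exact List.length_filter_le _ _

-- ---- B-side region lemmas ----

theorem maskRun_state (l : List Char) : ∀ d q e,
    (maskRun l d q e).2 = l.foldl wfStep (d, q, e) := by
  intro d q e
  induction l generalizing d q e with
  | nil => rfl
  | cons ch rest ih =>
    by_cases h1 : d > 0 <;> by_cases h2 : q <;> by_cases h3 : e <;>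
      by_cases c1 : ch = '\\' <;> by_cases c2 : ch = '"' <;>
        by_cases c3 : ch = '(' <;> by_cases c4 : ch = ')' <;>
          (simp_all [maskRun, wfStep, ih]; try (split <;> rfl))

-- outside any region, over a stretch with no unescaped opener, the scan copies
theorem maskOut (l : List Char) : ∀ n i, i + n ≤ l.length →
    (∀ j, i ≤ j → j < i + n → ¬(runD l j % 2 = 0 ∧ (l.getD j ' ' = '"' ∨ l.getD j ' ' = '('))) →
    maskRun (l.drop i) 0 false (eOf l i) =
      (((l.drop i).take n) ++ (maskRun (l.drop (i + n)) 0 false (eOf l (i + n))).1,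
       (maskRun (l.drop (i + n)) 0 false (eOf l (i + n))).2) := by
  intro n
  induction n with
  | zero => intro i h hno; simp
  | succ n ih =>
    intro i h hno
    have hlt : i < l.length := by omega
    have harr : i + (n + 1) = (i + 1) + n := by omega
    have hnop : ¬(runD l i % 2 = 0 ∧ (l.getD i ' ' = '"' ∨ l.getD i ' ' = '(')) :=
      hno i (le_refl i) (by omega)
    have hih := ih (i + 1) (by omega) (fun j hj1 hj2 => hno j (by omega) (by omega))
    rw [harr, drop_cons_getD l i hlt, List.take_succ_cons]
    by_cases he : eOf l i = true
    · have he1 : eOf l (i + 1) = false := by rw [eOf_succ, he]; rfl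
      rw [he1] at hih
      rw [he]
      simp [maskRun, hih, -List.getD_eq_getElem?_getD]
    · have he' : eOf l i = false := by simpa using he
      have hev : runD l i % 2 = 0 := by
        have : ¬ runD l i % 2 = 1 := by simpa [eOf] using he
        omega
      rw [he']
      by_cases hc : l.getD i ' ' = '\\'
      · have he1 : eOf l (i + 1) = true := by rw [eOf_succ, he', hc]; rfl
        rw [he1] at hih
        simp [maskRun, hc, hih, -List.getD_eq_getElem?_getD]
      · have hq : ¬ l.getD i ' ' = '"' := fun hh => hnop ⟨hev, Or.inl hh⟩
        have hb : ¬ l.getD i ' ' = '(' := fun hh => hnop ⟨hev, Or.inr hh⟩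
        have he1 : eOf l (i + 1) = false := by rw [eOf_succ, he']; simp [hc, -List.getD_eq_getElem?_getD]
        rw [he1] at hih
        simp [maskRun, hc, hq, hb, hih, -List.getD_eq_getElem?_getD]

theorem maskQuote_some (cs : List Char) : ∀ i j, ffrom cs '"' i = some j →
    maskRun (cs.drop i) 0 true (eOf cs i) =
      (List.replicate (j + 1 - i) 'q' ++ (maskRun (cs.drop (j + 1)) 0 false false).1,
       (maskRun (cs.drop (j + 1)) 0 false false).2) := by
  intro i
  induction hn : cs.length - i generalizing i with
  | zero => intro j h; rw [ffrom_stop cs '"' i (by omega)] at h; cases h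
  | succ n ih =>
    intro j h
    have hlt : i < cs.length := by omega
    rw [ffrom_step cs '"' i hlt] at h
    rw [drop_cons_getD cs i hlt]
    by_cases he : eOf cs i = true
    · have hev : ¬ runD cs i % 2 = 0 := by
        have : runD cs i % 2 = 1 := by simpa [eOf] using he
        omega
      rw [if_neg (fun hh => hev hh.1)] at h
      have hfacts := ffrom_some_facts cs '"' (i + 1) j h
      have he1 : eOf cs (i + 1) = false := by rw [eOf_succ, he]; rfl
      have hih := ih (i + 1) (by omega) j h
      rw [he1] at hih
      have hj1 : j + 1 - i = (j + 1 - (i + 1)) + 1 := by omega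
      rw [hj1]
      simp [maskRun, he, hih, List.replicate_succ, -List.getD_eq_getElem?_getD]
    · have he' : eOf cs i = false := by simpa using he
      have hev : runD cs i % 2 = 0 := by
        have : ¬ runD cs i % 2 = 1 := by simpa [eOf] using he
        omega
      by_cases hq : cs.getD i ' ' = '"'
      · rw [if_pos ⟨hev, hq⟩] at h
        injection h with h
        subst h
        simp [maskRun, he', hq, -List.getD_eq_getElem?_getD]
      · rw [if_neg (fun hh => hq hh.2)] at h
        have hfacts := ffrom_some_facts cs '"' (i + 1) j h
        have hih := ih (i + 1) (by omega) j h
        have hj1 : j + 1 - i = (j + 1 - (i + 1)) + 1 := by omega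
        rw [hj1]
        by_cases hc : cs.getD i ' ' = '\\'
        · have he1 : eOf cs (i + 1) = true := by rw [eOf_succ, he', hc]; rfl
          rw [he1] at hih
          simp [maskRun, he', hq, hc, hih, List.replicate_succ, -List.getD_eq_getElem?_getD]
        · have he1 : eOf cs (i + 1) = false := by
            rw [eOf_succ, he']; simp [hc, -List.getD_eq_getElem?_getD]
          rw [he1] at hih
          simp [maskRun, he', hq, hc, hih, List.replicate_succ, -List.getD_eq_getElem?_getD]

theorem maskQuote_none (cs : List Char) : ∀ i, ffrom cs '"' i = none →
    (maskRun (cs.drop i) 0 true (eOf cs i)).2.2.1 = true := by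
  intro i
  induction hn : cs.length - i generalizing i with
  | zero =>
    intro h
    rw [List.drop_eq_nil_of_le (by omega)]
    simp [maskRun]
  | succ n ih =>
    intro h
    have hlt : i < cs.length := by omega
    rw [ffrom_step cs '"' i hlt] at h
    by_cases hcond : runD cs i % 2 = 0 ∧ cs.getD i ' ' = '"'
    · rw [if_pos hcond] at h; cases h
    · rw [if_neg hcond] at h
      have hih := ih (i + 1) (by omega) h
      rw [drop_cons_getD cs i hlt]
      by_cases he : eOf cs i = true
      · have he1 : eOf cs (i + 1) = false := by rw [eOf_succ, he]; rfl
        rw [he1] at hih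
        simp [maskRun, he, hih, -List.getD_eq_getElem?_getD]
      · have he' : eOf cs i = false := by simpa using he
        have hev : runD cs i % 2 = 0 := by
          have : ¬ runD cs i % 2 = 1 := by simpa [eOf] using he
          omega
        have hq : ¬ cs.getD i ' ' = '"' := fun hh => hcond ⟨hev, hh⟩
        by_cases hc : cs.getD i ' ' = '\\'
        · have he1 : eOf cs (i + 1) = true := by rw [eOf_succ, he', hc]; rfl
          rw [he1] at hih
          simp [maskRun, he', hq, hc, hih, -List.getD_eq_getElem?_getD]
        · have he1 : eOf cs (i + 1) = false := by
            rw [eOf_succ, he']; simp [hc, -List.getD_eq_getElem?_getD]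
          rw [he1] at hih
          simp [maskRun, he', hq, hc, hih, -List.getD_eq_getElem?_getD]

theorem maskComment_some (cs : List Char) : ∀ i (d : Int) j, 1 ≤ d → mdepth cs i d = some j →
    maskRun (cs.drop i) d false (eOf cs i) =
      (List.replicate (j + 1 - i) 'c' ++ (maskRun (cs.drop (j + 1)) 0 false false).1,
       (maskRun (cs.drop (j + 1)) 0 false false).2) := by
  intro i
  induction hn : cs.length - i generalizing i with
  | zero => intro d j hd h; rw [mdepth_stop cs i d (by omega)] at h; cases h
  | succ n ih =>
    intro d j hd h
    have hlt : i < cs.length := by omega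
    have hdp : (0 : Int) < d := by omega
    rw [mdepth_step cs i d hlt] at h
    rw [drop_cons_getD cs i hlt]
    by_cases he : eOf cs i = true
    · have hev : ¬ runD cs i % 2 = 0 := by
        have : runD cs i % 2 = 1 := by simpa [eOf] using he
        omega
      rw [if_neg (fun hh => hev hh.1), if_neg (fun hh => hev hh.1)] at h
      obtain ⟨hj, _⟩ := mdepth_some_facts cs (i + 1) d j h
      have he1 : eOf cs (i + 1) = false := by rw [eOf_succ, he]; rfl
      have hih := ih (i + 1) (by omega) d j hd h
      rw [he1] at hih
      rw [show j + 1 - i = (j + 1 - (i + 1)) + 1 by omega]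
      simp [maskRun, he, hdp, hih, List.replicate_succ, -List.getD_eq_getElem?_getD]
    · have he' : eOf cs i = false := by simpa using he
      have hev : runD cs i % 2 = 0 := by
        have : ¬ runD cs i % 2 = 1 := by simpa [eOf] using he
        omega
      by_cases hb : cs.getD i ' ' = '('
      · rw [if_pos ⟨hev, hb⟩] at h
        obtain ⟨hj, _⟩ := mdepth_some_facts cs (i + 1) (d + 1) j h
        have he1 : eOf cs (i + 1) = false := by
          rw [eOf_succ, he']; simp [hb, -List.getD_eq_getElem?_getD]
        have hih := ih (i + 1) (by omega) (d + 1) j (by omega) h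
        rw [he1] at hih
        rw [show j + 1 - i = (j + 1 - (i + 1)) + 1 by omega]
        simp [maskRun, he', hb, hdp, hih, List.replicate_succ, -List.getD_eq_getElem?_getD]
      · rw [if_neg (fun hh => hb hh.2)] at h
        by_cases hp : cs.getD i ' ' = ')'
        · rw [if_pos ⟨hev, hp⟩] at h
          by_cases hone : d = 1
          · rw [if_pos hone] at h
            injection h with h
            subst h
            subst hone
            simp [maskRun, he', hb, hp, hdp, -List.getD_eq_getElem?_getD]
          · rw [if_neg hone] at h
            obtain ⟨hj, _⟩ := mdepth_some_facts cs (i + 1) (d - 1) j h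
            have he1 : eOf cs (i + 1) = false := by
              rw [eOf_succ, he']; simp [hp, -List.getD_eq_getElem?_getD]
            have hih := ih (i + 1) (by omega) (d - 1) j (by omega) h
            rw [he1] at hih
            rw [show j + 1 - i = (j + 1 - (i + 1)) + 1 by omega]
            simp [maskRun, he', hb, hp, hdp, hih, List.replicate_succ, -List.getD_eq_getElem?_getD]
        · rw [if_neg (fun hh => hp hh.2)] at h
          obtain ⟨hj, _⟩ := mdepth_some_facts cs (i + 1) d j h
          have hih := ih (i + 1) (by omega) d j hd h
          rw [show j + 1 - i = (j + 1 - (i + 1)) + 1 by omega]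
          by_cases hc : cs.getD i ' ' = '\\'
          · have he1 : eOf cs (i + 1) = true := by rw [eOf_succ, he', hc]; rfl
            rw [he1] at hih
            simp [maskRun, he', hb, hp, hc, hdp, hih, List.replicate_succ, -List.getD_eq_getElem?_getD]
          · have he1 : eOf cs (i + 1) = false := by
              rw [eOf_succ, he']; simp [hc, -List.getD_eq_getElem?_getD]
            rw [he1] at hih
            simp [maskRun, he', hb, hp, hc, hdp, hih, List.replicate_succ, -List.getD_eq_getElem?_getD]

theorem maskComment_none (cs : List Char) : ∀ i (d : Int), 1 ≤ d → mdepth cs i d = none →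
    1 ≤ (maskRun (cs.drop i) d false (eOf cs i)).2.1 := by
  intro i
  induction hn : cs.length - i generalizing i with
  | zero =>
    intro d hd h
    rw [List.drop_eq_nil_of_le (by omega)]
    simpa [maskRun] using hd
  | succ n ih =>
    intro d hd h
    have hlt : i < cs.length := by omega
    have hdp : (0 : Int) < d := by omega
    rw [mdepth_step cs i d hlt] at h
    rw [drop_cons_getD cs i hlt]
    by_cases he : eOf cs i = true
    · have hev : ¬ runD cs i % 2 = 0 := by
        have : runD cs i % 2 = 1 := by simpa [eOf] using he
        omega
      rw [if_neg (fun hh => hev hh.1), if_neg (fun hh => hev hh.1)] at h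
      have he1 : eOf cs (i + 1) = false := by rw [eOf_succ, he]; rfl
      have hih := ih (i + 1) (by omega) d hd h
      rw [he1] at hih
      simpa [maskRun, he, hdp, -List.getD_eq_getElem?_getD] using hih
    · have he' : eOf cs i = false := by simpa using he
      have hev : runD cs i % 2 = 0 := by
        have : ¬ runD cs i % 2 = 1 := by simpa [eOf] using he
        omega
      by_cases hb : cs.getD i ' ' = '('
      · rw [if_pos ⟨hev, hb⟩] at h
        have he1 : eOf cs (i + 1) = false := by
          rw [eOf_succ, he']; simp [hb, -List.getD_eq_getElem?_getD]
        have hih := ih (i + 1) (by omega) (d + 1) (by omega) h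
        rw [he1] at hih
        simpa [maskRun, he', hb, hdp, -List.getD_eq_getElem?_getD] using hih
      · rw [if_neg (fun hh => hb hh.2)] at h
        by_cases hp : cs.getD i ' ' = ')'
        · rw [if_pos ⟨hev, hp⟩] at h
          by_cases hone : d = 1
          · rw [if_pos hone] at h; cases h
          · rw [if_neg hone] at h
            have he1 : eOf cs (i + 1) = false := by
              rw [eOf_succ, he']; simp [hp, -List.getD_eq_getElem?_getD]
            have hih := ih (i + 1) (by omega) (d - 1) (by omega) h
            rw [he1] at hih
            simpa [maskRun, he', hb, hp, hdp, -List.getD_eq_getElem?_getD] using hih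
        · rw [if_neg (fun hh => hp hh.2)] at h
          by_cases hc : cs.getD i ' ' = '\\'
          · have he1 : eOf cs (i + 1) = true := by rw [eOf_succ, he', hc]; rfl
            have hih := ih (i + 1) (by omega) d hd h
            rw [he1] at hih
            simpa [maskRun, he', hb, hp, hc, hdp, -List.getD_eq_getElem?_getD] using hih
          · have he1 : eOf cs (i + 1) = false := by
              rw [eOf_succ, he']; simp [hc, -List.getD_eq_getElem?_getD]
            have hih := ih (i + 1) (by omega) d hd h
            rw [he1] at hih
            simpa [maskRun, he', hb, hp, hc, hdp, -List.getD_eq_getElem?_getD] using hih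

-- ---- assembly helpers ----

theorem eOf_zero (l : List Char) : eOf l 0 = false := rfl

theorem maskSplit (l : List Char) (p : Nat) (hp : p ≤ l.length)
    (hno : ∀ j, j < p → ¬(runD l j % 2 = 0 ∧ (l.getD j ' ' = '"' ∨ l.getD j ' ' = '('))) :
    maskRun l 0 false false =
      (l.take p ++ (maskRun (l.drop p) 0 false (eOf l p)).1,
       (maskRun (l.drop p) 0 false (eOf l p)).2) := by
  have h := maskOut l p 0 (by omega) (fun j h1 h2 => hno j (by omega))
  rw [eOf_zero] at h
  simpa using h

theorem quoteEnter (l : List Char) (p : Nat) (hfq : ffrom l '"' 0 = some p)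
    (hnb : ∀ j, j < p → ¬(runD l j % 2 = 0 ∧ l.getD j ' ' = '(')) :
    maskRun l 0 false false =
      (l.take p ++ 'q' :: (maskRun (l.drop (p + 1)) 0 true false).1,
       (maskRun (l.drop (p + 1)) 0 true false).2) := by
  obtain ⟨-, hplen, hev, hgq⟩ := ffrom_some_facts l '"' 0 p hfq
  have hmin := ffrom_some_min l '"' 0 p hfq
  have hno : ∀ j, j < p → ¬(runD l j % 2 = 0 ∧ (l.getD j ' ' = '"' ∨ l.getD j ' ' = '(')) := by
    intro j hj ⟨h1, h2⟩
    rcases h2 with h2 | h2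
    · exact hmin j (by omega) hj ⟨h1, h2⟩
    · exact hnb j hj ⟨h1, h2⟩
  rw [maskSplit l p (by omega) hno]
  have hep : eOf l p = false := by simp [eOf, hev]
  rw [hep, drop_cons_getD l p hplen]
  simp [maskRun, hgq, -List.getD_eq_getElem?_getD]

theorem bracketEnter (l : List Char) (p : Nat) (hfb : ffrom l '(' 0 = some p)
    (hnq : ∀ j, j < p → ¬(runD l j % 2 = 0 ∧ l.getD j ' ' = '"')) :
    maskRun l 0 false false =
      (l.take p ++ 'c' :: (maskRun (l.drop (p + 1)) 1 false false).1,
       (maskRun (l.drop (p + 1)) 1 false false).2) := by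
  obtain ⟨-, hplen, hev, hgq⟩ := ffrom_some_facts l '(' 0 p hfb
  have hmin := ffrom_some_min l '(' 0 p hfb
  have hno : ∀ j, j < p → ¬(runD l j % 2 = 0 ∧ (l.getD j ' ' = '"' ∨ l.getD j ' ' = '(')) := by
    intro j hj ⟨h1, h2⟩
    rcases h2 with h2 | h2
    · exact hnq j hj ⟨h1, h2⟩
    · exact hmin j (by omega) hj ⟨h1, h2⟩
  rw [maskSplit l p (by omega) hno]
  have hep : eOf l p = false := by simp [eOf, hev]
  rw [hep, drop_cons_getD l p hplen]
  simp [maskRun, hgq, -List.getD_eq_getElem?_getD]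

-- the rebuilt string after masking indices [p, p+m) with the filler c
theorem maskedAgain (l : List Char) (p m : Nat) (c : Char) (hm : 1 ≤ m)
    (hc1 : ¬ c = '\\') (hc2 : ¬ c = '"') (hc3 : ¬ c = '(')
    (hp : p ≤ l.length) (hpm : p + m ≤ l.length)
    (hno : ∀ j, j < p → ¬(runD l j % 2 = 0 ∧ (l.getD j ' ' = '"' ∨ l.getD j ' ' = '('))) :
    maskRun (l.take p ++ List.replicate m c ++ l.drop (p + m)) 0 false false =
      (l.take p ++ List.replicate m c ++ (maskRun (l.drop (p + m)) 0 false false).1,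
       (maskRun (l.drop (p + m)) 0 false false).2) := by
  set l' := l.take p ++ List.replicate m c ++ l.drop (p + m) with hl'
  have hlen : l'.length = l.length := by
    simp [hl']
    omega
  have hpre : ∀ k, k < p → l'.getD k ' ' = l.getD k ' ' := by
    intro k hk
    have hk' : k < (l.take p).length := by simp; omega
    simp only [hl', List.getD, List.append_assoc, List.getElem?_append_left hk']
    rw [List.getElem?_take_of_lt hk]
  have hmid : ∀ j, p ≤ j → j < p + m → l'.getD j ' ' = c := by
    intro j h1 h2
    have hlp : (l.take p).length = p := by simp; omega
    have hj' : ¬ j < (l.take p).length := by omega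
    simp only [hl', List.getD, List.append_assoc, List.getElem?_append_right (by omega : (l.take p).length ≤ j)]
    rw [hlp]
    have hlt : j - p < (List.replicate m c).length := by simp; omega
    rw [List.getElem?_append_left hlt, List.getElem?_replicate]
    rw [if_pos (by omega : j - p < m)]
    rfl
  have hrun : ∀ j, j ≤ p → runD l' j = runD l j := by
    intro j hj
    exact runD_congr l' l j (fun k hk => hpre k (by omega))
  have hno' : ∀ j, j < p + m → ¬(runD l' j % 2 = 0 ∧ (l'.getD j ' ' = '"' ∨ l'.getD j ' ' = '(')) := by
    intro j hj ⟨h1, h2⟩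
    by_cases hjp : j < p
    · rw [hpre j hjp] at h2
      rw [hrun j (by omega)] at h1
      exact hno j hjp ⟨h1, h2⟩
    · rw [hmid j (by omega) hj] at h2
      rcases h2 with h2 | h2
      · exact hc2 h2
      · exact hc3 h2
  have hdrop : l'.drop (p + m) = l.drop (p + m) := by
    have : (l.take p ++ List.replicate m c).length = p + m := by simp; omega
    rw [hl', List.drop_left' this]
  have htake : l'.take (p + m) = l.take p ++ List.replicate m c := by
    have : (l.take p ++ List.replicate m c).length = p + m := by simp; omega
    rw [hl', List.take_left' this]
  have hef : eOf l' (p + m) = false := by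
    have : runD l' (p + m) = 0 := by
      rw [show p + m = (p + m - 1) + 1 by omega, runD]
      rw [hmid (p + m - 1) (by omega) (by omega)]
      simp [hc1]
    simp [eOf, this]
  have h := maskSplit l' (p + m) (by omega) (fun j hj => hno' j hj)
  rw [hef, hdrop, htake] at h
  exact h

theorem countQB_lt (l : List Char) (p m : Nat) (c : Char) (hm : 1 ≤ m)
    (hc2 : ¬ c = '"') (hc3 : ¬ c = '(')
    (hplen : p < l.length) (hpm : p + m ≤ l.length)
    (hop : l.getD p ' ' = '"' ∨ l.getD p ' ' = '(') :
    countQB (l.take p ++ List.replicate m c ++ l.drop (p + m)) < countQB l := by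
  have hdec : l = l.take p ++ (l.drop p).take m ++ l.drop (p + m) := by
    rw [List.append_assoc]
    rw [show l.drop (p + m) = (l.drop p).drop m by rw [List.drop_drop, Nat.add_comm]]
    rw [List.take_append_drop, List.take_append_drop]
  have hmid : 1 ≤ countQB ((l.drop p).take m) := by
    rw [drop_cons_getD l p hplen, show m = (m - 1) + 1 by omega, List.take_succ_cons]
    rw [countQB, List.filter_cons]
    have : decide (l.getD p ' ' = '"' ∨ l.getD p ' ' = '(') = true := by
      simpa [-List.getD_eq_getElem?_getD] using hop
    rw [this]
    simp
  calc countQB (l.take p ++ List.replicate m c ++ l.drop (p + m))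
      = countQB (l.take p) + countQB (l.drop (p + m)) := by
        rw [countQB_append, countQB_append, countQB_replicate m c (by simp [hc2, hc3])]
        omega
    _ < countQB l := by
        conv_rhs => rw [hdec]
        rw [countQB_append, countQB_append]
        omega

theorem quoteStep (l : List Char) (p : Nat) (hfq : ffrom l '"' 0 = some p)
    (hnb : ∀ j, j < p → ¬(runD l j % 2 = 0 ∧ l.getD j ' ' = '('))
    (hq : (maskRun l 0 false false).2.2.1 = false) :
    ∃ q : Nat, ffrom (l.drop (p + 1)) '"' 0 = some q ∧
      closeQuote l (p : Int) = some ((q : Int) + p + 1) ∧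
      replacePart l (p : Int) ((q : Int) + p + 1) 'q' =
        l.take p ++ List.replicate (q + 2) 'q' ++ l.drop (p + q + 2) ∧
      maskRun (l.take p ++ List.replicate (q + 2) 'q' ++ l.drop (p + q + 2)) 0 false false =
        maskRun l 0 false false ∧
      countQB (l.take p ++ List.replicate (q + 2) 'q' ++ l.drop (p + q + 2)) < countQB l := by
  obtain ⟨-, hplen, hev, hgq⟩ := ffrom_some_facts l '"' 0 p hfq
  have hmin := ffrom_some_min l '"' 0 p hfq
  have hno : ∀ j, j < p → ¬(runD l j % 2 = 0 ∧ (l.getD j ' ' = '"' ∨ l.getD j ' ' = '(')) := by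
    intro j hj ⟨h1, h2⟩
    rcases h2 with h2 | h2
    · exact hmin j (by omega) hj ⟨h1, h2⟩
    · exact hnb j hj ⟨h1, h2⟩
  have henter := quoteEnter l p hfq hnb
  have h0 : eOf (l.drop (p + 1)) 0 = false := rfl
  cases hcq : ffrom (l.drop (p + 1)) '"' 0 with
  | none =>
    exfalso
    have hnone := maskQuote_none (l.drop (p + 1)) 0 hcq
    rw [h0, List.drop_zero] at hnone
    rw [henter] at hq
    simp only [] at hq
    rw [hq] at hnone
    cases hnone
  | some q =>
    obtain ⟨-, hqlen, -, -⟩ := ffrom_some_facts _ '"' 0 q hcq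
    rw [List.length_drop] at hqlen
    have hqlen' : q + p + 1 < l.length := by omega
    refine ⟨q, rfl, ?_, ?_, ?_, ?_⟩
    · rw [closeQuote_eq l p, hcq]
    · rw [show ((q : Int) + p + 1) = (((q + p + 1 : Nat)) : Int) by push_cast; ring]
      rw [replacePart_eq l p (q + p + 1) 'q' (by omega) hqlen']
      rw [show q + p + 1 + 1 - p = q + 2 by omega, show q + p + 1 + 1 = p + (q + 2) by omega,
        show p + (q + 2) = p + q + 2 by omega]
    · have hmasked := maskedAgain l p (q + 2) 'q' (by omega) (by decide) (by decide) (by decide)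
        (by omega) (by omega) hno
      rw [show p + (q + 2) = p + q + 2 from by omega] at hmasked
      have hsome := maskQuote_some (l.drop (p + 1)) 0 q hcq
      rw [h0, List.drop_zero] at hsome
      have hdd : (l.drop (p + 1)).drop (q + 1) = l.drop (p + q + 2) := by
        rw [List.drop_drop]; congr 1; omega
      rw [hdd] at hsome
      rw [henter, hsome, hmasked]
      simp [List.replicate_succ]
    · exact countQB_lt l p (q + 2) 'q' (by omega) (by decide) (by decide) hplen (by omega)
        (Or.inl hgq)

theorem bracketStep (l : List Char) (p : Nat) (hfb : ffrom l '(' 0 = some p)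
    (hnq : ∀ j, j < p → ¬(runD l j % 2 = 0 ∧ l.getD j ' ' = '"'))
    (hd : (maskRun l 0 false false).2.1 = 0) :
    ∃ j : Nat, mdepth (l.drop (p + 1)) 0 1 = some j ∧
      closeBracket l (p : Int) = some ((j : Int) + p + 1) ∧
      replacePart l (p : Int) ((j : Int) + p + 1) 'c' =
        l.take p ++ List.replicate (j + 2) 'c' ++ l.drop (p + j + 2) ∧
      maskRun (l.take p ++ List.replicate (j + 2) 'c' ++ l.drop (p + j + 2)) 0 false false =
        maskRun l 0 false false ∧
      countQB (l.take p ++ List.replicate (j + 2) 'c' ++ l.drop (p + j + 2)) < countQB l := by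
  obtain ⟨-, hplen, hev, hgb⟩ := ffrom_some_facts l '(' 0 p hfb
  have hmin := ffrom_some_min l '(' 0 p hfb
  have hno : ∀ j, j < p → ¬(runD l j % 2 = 0 ∧ (l.getD j ' ' = '"' ∨ l.getD j ' ' = '(')) := by
    intro j hj ⟨h1, h2⟩
    rcases h2 with h2 | h2
    · exact hnq j hj ⟨h1, h2⟩
    · exact hmin j (by omega) hj ⟨h1, h2⟩
  have henter := bracketEnter l p hfb hnq
  have h0 : eOf (l.drop (p + 1)) 0 = false := rfl
  cases hcb : mdepth (l.drop (p + 1)) 0 1 with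
  | none =>
    exfalso
    have hnone := maskComment_none (l.drop (p + 1)) 0 1 (by omega) hcb
    rw [h0, List.drop_zero] at hnone
    rw [henter] at hd
    simp only [] at hd
    rw [hd] at hnone
    omega
  | some j =>
    obtain ⟨-, hjlen⟩ := mdepth_some_facts (l.drop (p + 1)) 0 1 j hcb
    rw [List.length_drop] at hjlen
    have hjlen' : j + p + 1 < l.length := by omega
    refine ⟨j, rfl, ?_, ?_, ?_, ?_⟩
    · rw [closeBracket_eq l p, hcb]
    · rw [show ((j : Int) + p + 1) = (((j + p + 1 : Nat)) : Int) by push_cast; ring]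
      rw [replacePart_eq l p (j + p + 1) 'c' (by omega) hjlen']
      rw [show j + p + 1 + 1 - p = j + 2 by omega, show j + p + 1 + 1 = p + (j + 2) by omega,
        show p + (j + 2) = p + j + 2 by omega]
    · have hmasked := maskedAgain l p (j + 2) 'c' (by omega) (by decide) (by decide) (by decide)
        (by omega) (by omega) hno
      rw [show p + (j + 2) = p + j + 2 from by omega] at hmasked
      have hsome := maskComment_some (l.drop (p + 1)) 0 1 j (by omega) hcb
      rw [h0, List.drop_zero] at hsome
      have hdd : (l.drop (p + 1)).drop (j + 1) = l.drop (p + j + 2) := by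
        rw [List.drop_drop]; congr 1; omega
      rw [hdd] at hsome
      rw [henter, hsome, hmasked]
      simp [List.replicate_succ]
    · exact countQB_lt l p (j + 2) 'c' (by omega) (by decide) (by decide) hplen (by omega)
        (Or.inr hgb)

-- ---- the main equivalence ----

theorem rqc_main : ∀ f l, countQB l < f →
    (maskRun l 0 false false).2.1 = 0 → (maskRun l 0 false false).2.2.1 = false →
    rqcLoop f l = some (maskRun l 0 false false).1 := by
  intro f
  induction f with
  | zero => intro l h _ _; omega
  | succ f ih =>
    intro l hcount hd hq
    rw [rqcLoop, openQuoteAndBracket_eq l]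
    cases hfq : ffrom l '"' 0 with
    | none =>
      cases hfb : ffrom l '(' 0 with
      | none =>
        simp only [optInt]
        rw [if_neg (by simp), if_pos (by exact ⟨by simp, by simp⟩)]
        have hns : ∀ j, j < l.length →
            ¬(runD l j % 2 = 0 ∧ (l.getD j ' ' = '"' ∨ l.getD j ' ' = '(')) := by
          intro j hj ⟨h1, h2⟩
          rcases h2 with h2 | h2
          · exact ffrom_none_forall l '"' 0 hfq j (by omega) hj ⟨h1, h2⟩
          · exact ffrom_none_forall l '(' 0 hfb j (by omega) hj ⟨h1, h2⟩
        have h := maskSplit l l.length (le_refl _) (fun j hj => hns j hj)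
        rw [List.drop_length] at h
        rw [h]
        simp [maskRun]
      | some b =>
        obtain ⟨-, hblen, -, -⟩ := ffrom_some_facts l '(' 0 b hfb
        have hnq : ∀ j, j < b → ¬(runD l j % 2 = 0 ∧ l.getD j ' ' = '"') := by
          intro j hj hh
          exact ffrom_none_forall l '"' 0 hfq j (by omega) (by omega) hh
        obtain ⟨j, hmd, hcb, hrp, hmask, hlt⟩ := bracketStep l b hfb hnq hd
        simp only [optInt]
        rw [if_pos (by exact ⟨by simp, by omega⟩), hcb]
        show rqcLoop f (replacePart l (b : Int) ((j : Int) + b + 1) 'c') =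
          some (maskRun l 0 false false).1
        rw [hrp, ih _ (by omega) (by rw [hmask]; exact hd) (by rw [hmask]; exact hq), hmask]
    | some p =>
      obtain ⟨-, hplen, -, hgq⟩ := ffrom_some_facts l '"' 0 p hfq
      cases hfb : ffrom l '(' 0 with
      | none =>
        have hnb : ∀ j, j < p → ¬(runD l j % 2 = 0 ∧ l.getD j ' ' = '(') := by
          intro j hj hh
          exact ffrom_none_forall l '(' 0 hfb j (by omega) (by omega) hh
        obtain ⟨q, hcq, hclose, hrp, hmask, hlt⟩ := quoteStep l p hfq hnb hq
        simp only [optInt]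
        rw [if_neg (by rintro ⟨h1, -⟩; omega), if_neg (by rintro ⟨h1, -⟩; omega),
          if_pos (by exact ⟨by simp, by omega⟩), hclose]
        show rqcLoop f (replacePart l (p : Int) ((q : Int) + p + 1) 'q') =
          some (maskRun l 0 false false).1
        rw [hrp, ih _ (by omega) (by rw [hmask]; exact hd) (by rw [hmask]; exact hq), hmask]
      | some b =>
        obtain ⟨-, hblen, -, hgb⟩ := ffrom_some_facts l '(' 0 b hfb
        have hpb : ¬ p = b := by
          intro h
          subst h
          rw [hgq] at hgb
          cases hgb
        simp only [optInt]
        rw [if_neg (by rintro ⟨h1, -⟩; omega), if_neg (by rintro ⟨h1, -⟩; omega),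
          if_neg (by rintro ⟨h1, -⟩; omega)]
        by_cases hlt2 : p < b
        · rw [if_pos (by exact_mod_cast hlt2)]
          have hnb : ∀ j, j < p → ¬(runD l j % 2 = 0 ∧ l.getD j ' ' = '(') := by
            intro j hj hh
            exact ffrom_some_min l '(' 0 b hfb j (by omega) (by omega) hh
          obtain ⟨q, hcq, hclose, hrp, hmask, hltc⟩ := quoteStep l p hfq hnb hq
          rw [hclose]
          show rqcLoop f (replacePart l (p : Int) ((q : Int) + p + 1) 'q') =
            some (maskRun l 0 false false).1
          rw [hrp, ih _ (by omega) (by rw [hmask]; exact hd) (by rw [hmask]; exact hq), hmask]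
        · rw [if_neg (by exact_mod_cast hlt2)]
          have hnq : ∀ j, j < b → ¬(runD l j % 2 = 0 ∧ l.getD j ' ' = '"') := by
            intro j hj hh
            exact ffrom_some_min l '"' 0 p hfq j (by omega) (by omega) hh
          obtain ⟨j, hmd, hcb, hrp, hmask, hltc⟩ := bracketStep l b hfb hnq hd
          rw [hcb]
          show rqcLoop f (replacePart l (b : Int) ((j : Int) + b + 1) 'c') =
            some (maskRun l 0 false false).1
          rw [hrp, ih _ (by omega) (by rw [hmask]; exact hd) (by rw [hmask]; exact hq), hmask]

-- ===== VERDICT (by name: the statement is the Claim_ definition above) =====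
theorem DotsValid_spec : Claim_equal_DotsValid := by
  intro address _dom pre
  obtain ⟨h1, h2⟩ := pre
  have hs := maskRun_state address.toList 0 false false
  have hd : (maskRun address.toList 0 false false).2.1 = 0 := by rw [hs]; exact h1
  have hq : (maskRun address.toList 0 false false).2.2.1 = false := by rw [hs]; exact h2
  have hm := rqc_main (address.toList.length + 1) address.toList
    (by have := countQB_le_length address.toList; omega) hd hq
  show DotsValid address = DotsValid_alt address
  rw [DotsValid, DotsValid_alt]
  simp only [hm, hd, hq]
  simp
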